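-- pv_equiv track=rewrite | github.com/BROC95/PythonPhysic | ab_initio/vasp_center.py | datN
-- ===== SOURCE A (Python) =====
-- def datN(info):
--     try:
--         for i in range(3):
--             index = info.index("")
--             info.pop(index)
--         return info
--     except:
--         return info
-- ===== SOURCE B (Python) =====
-- def datN(info):
--     # single in-place pass removing the first up to three "" entries;
--     # blanket except preserves A's behaviour on non-list inputs
--     try:
--         i = 0
--         removed = 0
--         while i < len(info) and removed < 3:
--             if info[i] == "":
--                 info.pop(i)
--                 removed += 1
--             else:
--                 i += 1
--         return info
--     except:
--         return info
-- ===== Notes on version B (the rewrite author's own statement) =====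
-- stated objective: alternative
-- what changed: Replaces three restart scans (each .index from the front plus .pop) with a single left-to-right in-place pass that pops empty strings as it meets them, counting up to three, with the same blanket except; same overall cost.
import Mathlib
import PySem

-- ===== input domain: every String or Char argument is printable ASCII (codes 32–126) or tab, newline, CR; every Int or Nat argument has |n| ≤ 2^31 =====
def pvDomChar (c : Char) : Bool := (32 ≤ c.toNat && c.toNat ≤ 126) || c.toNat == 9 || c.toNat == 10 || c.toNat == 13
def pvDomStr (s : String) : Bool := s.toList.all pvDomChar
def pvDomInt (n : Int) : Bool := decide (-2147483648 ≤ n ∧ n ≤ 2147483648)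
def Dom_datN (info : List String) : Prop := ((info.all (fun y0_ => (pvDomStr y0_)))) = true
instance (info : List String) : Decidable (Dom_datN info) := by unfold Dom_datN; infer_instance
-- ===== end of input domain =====

-- B: one in-place left-to-right pass popping up to three "" entries, instead of A's three restart scans (same return value; both Pythons mutate the argument in place — the equivalence is about the returned list).
-- ===== PORT A =====
def datNLoopA : Nat → List String → List String
  | 0, l => l
  | n+1, l =>
    match PySem.List.index? l "" with
    | none => l                       -- .index raises ValueError; except returns info
    | some idx =>
      match PySem.List.pop? l ((idx : Nat) : Int) with
      | none => l                     -- unreachable: idx is a valid index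
      | some (_, l') => datNLoopA n l'

def datN (info : List String) : List String := datNLoopA 3 info

-- ===== PORT B =====
def datNLoopB (l : List String) (i removed : Nat) : List String :=
  if h : i < l.length ∧ removed < 3 then
    if l[i]'(h.1) = "" then datNLoopB (l.eraseIdx i) i (removed+1)
    else datNLoopB l (i+1) removed
  else l
termination_by l.length - i
decreasing_by
  · simp only [List.length_eraseIdx, if_pos h.1]; omega
  · omega

def datN_alt (info : List String) : List String := datNLoopB info 0 0

-- ===== PRECONDITION & SPEC =====
def Spec_datN (info : List String) (out : List String) : Prop := out = datN_alt info
instance (info : List String) (out : List String) : Decidable (Spec_datN info out) := by unfold Spec_datN; infer_instance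

-- ===== CLAIM (what is proved, stated in full; the proofs are below) =====
def Claim_equal_datN : Prop := ∀ (info : List String), Dom_datN info → Spec_datN info (datN info)

-- ===== LEMMAS AND PROOFS =====

-- removes up to n first occurrences of "" (index? + eraseIdx formulation)
def eraseN : Nat → List String → List String
  | 0, l => l
  | n+1, l =>
    match PySem.List.index? l "" with
    | none => l
    | some k => eraseN n (l.eraseIdx k)

lemma eraseN_of_not_mem (k : Nat) (l : List String) (h : "" ∉ l) : eraseN k l = l := by
  cases k with
  | zero => rfl
  | succ n =>
    have hn : PySem.List.index? l "" = none := (PySem.List.index?_eq_none_iff l "").mpr h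
    unfold eraseN
    rw [hn]

lemma loopA_eq (n : Nat) (l : List String) : datNLoopA n l = eraseN n l := by
  induction n generalizing l with
  | zero => rfl
  | succ n ih =>
    unfold datNLoopA eraseN
    cases hidx : PySem.List.index? l "" with
    | none => rfl
    | some k =>
      obtain ⟨hk, _, _⟩ := PySem.List.getElem_of_index?_eq_some hidx
      have hpop : PySem.List.pop? l ((k : Nat) : Int) = some (l[k], l.eraseIdx k) :=
        PySem.List.pop?_natCast l k hk
      simp only [hpop, ih]

lemma index?_eq_of_first (l : List String) (i : Nat) (hi : i < l.length)
    (hinv : ∀ j, j < i → ∀ (hj : j < l.length), l[j] ≠ "") (hl : l[i] = "") :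
    PySem.List.index? l "" = some i := by
  apply (PySem.List.index?_eq_some_iff l "" i).mpr
  refine ⟨l.take i, l.drop (i+1), ?_, by simp [List.length_take]; omega, ?_⟩
  · rw [← hl]
    rw [List.getElem_cons_drop hi, List.take_append_drop]
  · intro hmem
    rw [List.mem_take_iff_getElem] at hmem
    obtain ⟨j, hj, hje⟩ := hmem
    have hji : j < i := by omega
    exact hinv j hji (by omega) hje

lemma loopB_eq (l : List String) (i r : Nat)
    (hinv : ∀ j, j < i → ∀ (hj : j < l.length), l[j] ≠ "") :
    datNLoopB l i r = eraseN (3 - r) l := by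
  unfold datNLoopB
  split
  · rename_i h
    obtain ⟨hi, hr⟩ := h
    split
    · rename_i he
      have hidx : PySem.List.index? l "" = some i := index?_eq_of_first l i hi hinv he
      have hrec : datNLoopB (l.eraseIdx i) i (r+1) = eraseN (3 - (r+1)) (l.eraseIdx i) := by
        apply loopB_eq
        intro j hj hjl
        have hjl' : j < l.length - 1 := by
          have := List.length_eraseIdx (l := l) (i := i); omega
        rw [List.getElem_eraseIdx_of_lt hjl hj]
        exact hinv j hj (by omega)
      rw [hrec]
      have h3 : 3 - r = (3 - (r+1)) + 1 := by omega
      rw [h3, eraseN, hidx]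
    · rename_i he
      apply loopB_eq
      intro j hj hjl
      rcases Nat.lt_or_ge j i with hji | hji
      · exact hinv j hji hjl
      · have : j = i := by omega
        subst this; exact he
  · rename_i h
    rcases Nat.lt_or_ge r 3 with hr | hr
    · have hi : l.length ≤ i := by omega
      have hnm : "" ∉ l := by
        intro hmem
        obtain ⟨j, hj, hje⟩ := List.mem_iff_getElem.mp hmem
        exact hinv j (by omega) hj hje
      exact (eraseN_of_not_mem _ _ hnm).symm
    · have : 3 - r = 0 := by omega
      rw [this]; rfl
termination_by l.length - i
decreasing_by
  · omega
  · simp only [List.length_eraseIdx, if_pos hi]; omega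

-- ===== VERDICT =====
theorem datN_spec : Claim_equal_datN := by
  intro info _
  unfold Spec_datN datN datN_alt
  rw [loopA_eq, loopB_eq info 0 0 (fun j hj _ => absurd hj (Nat.not_lt_zero j))]
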